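-- pv_equiv track=rewrite | github.com/vjousse/unmerdify | src/unmerdify/site_config.py | get_possible_config_file_names_for_host
-- ===== SOURCE A (Python) =====
-- def get_possible_config_file_names_for_host(
--     host: str, file_extension: str = ".txt"
-- ) -> list[str]:
--     """
--     The five filters config files can be of the form
--
--     - .specific.domain.tld (for *.specific.domain.tld)
--     - specific.domain.tld (for this specific domain)
--     - .domain.tld (for *.domain.tld)
--     - domain.tld (for domain.tld)
--     """
--
--     parts = host.split(".")
--
--     if len(parts) < 2:
--         raise ValueError(
--             "The host must be of the form `host.com`. It seems that there is no dot in your host"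
--         )
--
--     tld = parts.pop()
--     domain = parts.pop()
--
--     first_possible_name = f"{domain}.{tld}{file_extension}"
--     possible_names = [first_possible_name, f".{first_possible_name}"]
--
--     # While we still have parts in the domain name, prepend the part
--     # and create the 2 new possible names
--     while len(parts) > 0:
--         next_part = parts.pop()
--         possible_name = f"{next_part}.{possible_names[-2]}"
--         possible_names.append(possible_name)
--         possible_names.append(f".{possible_name}")
--
--     # Put the most specific file names first
--     possible_names.reverse()
--
--     return possible_names
-- ===== SOURCE B (Python) =====
-- def get_possible_config_file_names_for_host(
--     host: str, file_extension: str = ".txt"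
-- ) -> list[str]:
--     parts = host.split(".")
--
--     if len(parts) < 2:
--         raise ValueError(
--             "The host must be of the form `host.com`. It seems that there is no dot in your host"
--         )
--
--     possible_names = []
--     for i in range(len(parts) - 1):
--         base = ".".join(parts[i:]) + file_extension
--         possible_names.append("." + base)
--         possible_names.append(base)
--
--     return possible_names
-- ===== Notes on version B (the rewrite author's own statement) =====
-- stated objective: simpler
-- what changed: B replaces A's pop-from-the-end while-loop with its possible_names[-2] back-reference and final reverse() by a direct forward loop that joins each suffix parts[i:] and emits the dotted/undotted pair already in most-specific-first order.
import Mathlib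
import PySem

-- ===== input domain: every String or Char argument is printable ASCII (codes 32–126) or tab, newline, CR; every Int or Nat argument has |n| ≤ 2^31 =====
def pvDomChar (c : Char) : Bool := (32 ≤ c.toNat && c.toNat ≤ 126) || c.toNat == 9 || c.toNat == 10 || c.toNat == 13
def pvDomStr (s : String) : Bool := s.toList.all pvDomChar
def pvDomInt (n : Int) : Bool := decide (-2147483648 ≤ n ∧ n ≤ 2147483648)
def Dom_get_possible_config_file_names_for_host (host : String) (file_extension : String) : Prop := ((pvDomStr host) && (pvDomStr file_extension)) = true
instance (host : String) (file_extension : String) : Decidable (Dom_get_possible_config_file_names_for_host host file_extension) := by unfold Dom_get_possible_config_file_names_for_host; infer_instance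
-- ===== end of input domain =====

-- B builds the name list directly in most-specific-first order by joining each suffix parts[i:],
-- replacing A's pop/back-index/reverse machinery (objective: simpler). Return-value equivalence;
-- Pre_ excludes dotless hosts, on which Python A raises ValueError.


-- ===== PORT A =====
-- A's while-loop: pop the last part, prepend it to possible_names[-2], append the two variants.
def pvALoop (parts : List String) (names : List String) : List String :=
  match h : PySem.List.pop? parts (-1) with
  | none => names
  | some (next_part, rest) =>
      let name := next_part ++ "." ++ PySem.List.pyGetD names (-2) ""
      pvALoop rest (names ++ [name, "." ++ name])
termination_by parts.length
decreasing_by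
  have h2 := PySem.List.length_of_pop?_eq_some parts h
  simp at h2 ⊢
  omega

def get_possible_config_file_names_for_host (host : String) (file_extension : String) : List String :=
  match PySem.Str.split? host "." with
  | none => []      -- unreachable: the separator "." is nonempty
  | some parts =>
    if parts.length < 2 then []      -- Python raises ValueError here; excluded by Pre_
    else
      match PySem.List.pop? parts (-1) with
      | none => []      -- unreachable under the length check
      | some (tld, parts₁) =>
        match PySem.List.pop? parts₁ (-1) with
        | none => []      -- unreachable under the length check
        | some (domain, parts₂) =>
          let first_possible_name := domain ++ "." ++ tld ++ file_extension
          (pvALoop parts₂ [first_possible_name, "." ++ first_possible_name]).reverse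

-- ===== PORT B =====
def get_possible_config_file_names_for_host_alt (host : String) (file_extension : String) : List String :=
  match PySem.Str.split? host "." with
  | none => []      -- unreachable: the separator "." is nonempty
  | some parts =>
    if parts.length < 2 then []      -- Python raises ValueError here; excluded by Pre_
    else
      (PySem.List.pyRange 0 ((parts.length : Int) - 1) 1).foldl
        (fun res i =>
          let base := PySem.Str.join "." (PySem.List.slice parts (some i) none) ++ file_extension
          res ++ ["." ++ base, base]) []

-- ===== PRECONDITION & SPEC =====
-- Pre_ excludes exactly the hosts without a dot, on which Python A raises ValueError.
def Pre_get_possible_config_file_names_for_host (host : String) (file_extension : String) : Prop :=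
  2 ≤ ((PySem.Str.split? host ".").getD []).length
instance (host : String) (file_extension : String) : Decidable (Pre_get_possible_config_file_names_for_host host file_extension) := by unfold Pre_get_possible_config_file_names_for_host; infer_instance
def pvWitness_get_possible_config_file_names_for_host : String × String := ("example.com", ".txt")

def Spec_get_possible_config_file_names_for_host (host : String) (file_extension : String) (out : List String) : Prop := out = get_possible_config_file_names_for_host_alt host file_extension
instance (host : String) (file_extension : String) (out : List String) : Decidable (Spec_get_possible_config_file_names_for_host host file_extension out) := by unfold Spec_get_possible_config_file_names_for_host; infer_instance

-- ===== CLAIM (what is proved, stated in full; the proofs are below) =====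
def Claim_equal_get_possible_config_file_names_for_host : Prop := ∀ (host : String) (file_extension : String), Dom_get_possible_config_file_names_for_host host file_extension → Pre_get_possible_config_file_names_for_host host file_extension → Spec_get_possible_config_file_names_for_host host file_extension (get_possible_config_file_names_for_host host file_extension)

-- ===== LEMMAS AND PROOFS =====

-- The undotted/dotted pairs A's loop appends, read off the popped parts in reverse order.
def pvChainR : List String → String → List String
  | [], _ => []
  | x :: rest, seed =>
      let t := x ++ "." ++ seed
      t :: ("." ++ t) :: pvChainR rest t

-- The undotted base names, most specific first.
def pvBases : List String → String → List String
  | [], seed => [seed]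
  | x :: rest, seed => pvBases rest (x ++ "." ++ seed) ++ [seed]

theorem pvGetD2 {xs : List String} (a b : String) :
    PySem.List.pyGetD (xs ++ [a, b]) (-2) "" = a := by
  rw [PySem.List.pyGetD_neg_ofNat (xs ++ [a, b]) 2 "" (by omega) (by simp)]
  simp

theorem pvALoop_nil (names : List String) : pvALoop [] names = names := by
  rw [pvALoop.eq_def]
  split
  · rfl
  · rename_i np rest heq
    simp [PySem.List.pop?, PySem.List.pyIdx?] at heq

theorem pvALoop_concat (qs : List String) (x : String) (names : List String) :
    pvALoop (qs ++ [x]) names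
      = pvALoop qs (names ++ [x ++ "." ++ PySem.List.pyGetD names (-2) "",
          "." ++ (x ++ "." ++ PySem.List.pyGetD names (-2) "")]) := by
  rw [pvALoop.eq_def]
  split
  · rename_i heq; rw [PySem.List.pop?_last] at heq; cases heq
  · rename_i np rest heq
    rw [PySem.List.pop?_last] at heq
    obtain ⟨rfl, rfl⟩ := Prod.mk.injEq .. ▸ (Option.some.injEq _ _ ▸ heq)
    rfl

theorem pvALoop_eq (ps names : List String) :
    pvALoop ps names = names ++ pvChainR ps.reverse (PySem.List.pyGetD names (-2) "") := by
  induction ps using List.reverseRecOn generalizing names with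
  | nil => rw [pvALoop_nil]; simp [pvChainR]
  | append_singleton qs x ih =>
      rw [pvALoop_concat, ih, pvGetD2, List.reverse_append]
      simp [pvChainR, List.append_assoc]

theorem pvChainR_reverse (r : List String) (seed : String) :
    (pvChainR r seed).reverse ++ ["." ++ seed, seed]
      = (pvBases r seed).flatMap (fun b => ["." ++ b, b]) := by
  induction r generalizing seed with
  | nil => simp [pvChainR, pvBases]
  | cons x rest ih =>
      simp only [pvChainR, pvBases, List.reverse_cons, List.flatMap_append]
      rw [← ih (x ++ "." ++ seed)]
      simp

theorem pvJoin_cons (x : String) (rest : List String) (h : rest ≠ []) :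
    PySem.Str.join "." (x :: rest) = x ++ "." ++ PySem.Str.join "." rest := by
  match rest, h with
  | y :: t, _ =>
    apply String.toList_injective
    simp [PySem.Str.toList_join, String.toList_append, PySem.Chars.join_cons_cons]

theorem pvJoin_pair (d t s : String) :
    PySem.Str.join "." [d, t] ++ s = d ++ "." ++ t ++ s := by
  rw [pvJoin_cons d [t] (by simp)]
  apply String.toList_injective
  simp [String.toList_append, PySem.Str.toList_join, PySem.Chars.join_singleton]

theorem pvBases_eq (r : List String) (tail : List String) (h : tail ≠ [])
    (ext : String) :
    pvBases r (PySem.Str.join "." tail ++ ext)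
      = (List.range (r.length + 1)).map
          (fun i => PySem.Str.join "." ((r.reverse ++ tail).drop i) ++ ext) := by
  induction r generalizing tail with
  | nil => simp [pvBases, List.range_succ]
  | cons x rest ih =>
      have hx : x ++ "." ++ (PySem.Str.join "." tail ++ ext)
          = PySem.Str.join "." (x :: tail) ++ ext := by
        rw [pvJoin_cons x tail h]
        apply String.toList_injective
        simp [String.toList_append]
      have hre : rest.reverse ++ x :: tail = (x :: rest).reverse ++ tail := by simp
      have hdrop : ((x :: rest).reverse ++ tail).drop (rest.length + 1) = tail := by
        have h1 : (x :: rest).reverse.length = rest.length + 1 := by simp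
        rw [← h1]; exact List.drop_left
      simp only [pvBases, hx, ih (x :: tail) (by simp)]
      rw [show (x :: rest).length + 1 = (rest.length + 1) + 1 by simp]
      conv_rhs => rw [List.range_succ]
      rw [List.map_append]
      congr 1
      · rw [hre]
      · simp only [List.map_cons, List.map_nil]
        rw [hdrop]

theorem pv_spec_aux (parts : List String)
    (file_extension : String) (h2 : 2 ≤ parts.length) :
    (match PySem.List.pop? parts (-1) with
      | none => []
      | some (tld, parts₁) =>
        match PySem.List.pop? parts₁ (-1) with
        | none => []
        | some (domain, parts₂) =>
          let first := domain ++ "." ++ tld ++ file_extension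
          (pvALoop parts₂ [first, "." ++ first]).reverse)
      = (PySem.List.pyRange 0 ((parts.length : Int) - 1) 1).foldl
          (fun res i =>
            let base := PySem.Str.join "." (PySem.List.slice parts (some i) none)
                ++ file_extension
            res ++ ["." ++ base, base]) [] := by
  rcases List.eq_nil_or_concat parts with rfl | ⟨qs, t, rfl⟩
  · simp at h2
  rcases List.eq_nil_or_concat qs with rfl | ⟨qs₂, d, rfl⟩
  · simp at h2
  simp only [List.concat_eq_append, PySem.List.pop?_last]
  -- A side
  rw [pvALoop_eq]
  have hg : PySem.List.pyGetD [d ++ "." ++ t ++ file_extension,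
      "." ++ (d ++ "." ++ t ++ file_extension)] (-2) ""
      = d ++ "." ++ t ++ file_extension := by
    simpa using pvGetD2 (xs := []) (d ++ "." ++ t ++ file_extension)
      ("." ++ (d ++ "." ++ t ++ file_extension))
  rw [hg]
  have hrev : ∀ (a b : String) (L : List String),
      (([a, b] : List String) ++ L).reverse = L.reverse ++ [b, a] := by
    intro a b L; simp
  rw [hrev, pvChainR_reverse]
  rw [show d ++ "." ++ t ++ file_extension
        = PySem.Str.join "." [d, t] ++ file_extension from (pvJoin_pair d t file_extension).symm]
  rw [pvBases_eq qs₂.reverse [d, t] (by simp) file_extension]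
  -- B side
  rw [PySem.List.foldl_append_eq_flatMap
        (fun i => ["." ++ (PySem.Str.join "."
              (PySem.List.slice (qs₂ ++ [d] ++ [t]) (some i) none) ++ file_extension),
            PySem.Str.join "."
              (PySem.List.slice (qs₂ ++ [d] ++ [t]) (some i) none) ++ file_extension])]
  have hn : (((qs₂ ++ [d] ++ [t]).length : Int) - 1) = ((qs₂.length + 1 : Nat) : Int) := by
    simp; omega
  rw [hn, PySem.List.pyRange_zero_natCast, List.flatMap_map, List.flatMap_map]
  simp only [PySem.List.slice_from_natCast]
  simp [List.append_assoc]

-- ===== VERDICT (by name: the statement is the Claim_ definition above) =====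
theorem get_possible_config_file_names_for_host_spec : Claim_equal_get_possible_config_file_names_for_host := by
  intro host file_extension _ hpre
  unfold Spec_get_possible_config_file_names_for_host
  unfold get_possible_config_file_names_for_host get_possible_config_file_names_for_host_alt
  cases hs : PySem.Str.split? host "." with
  | none => rfl
  | some parts =>
      unfold Pre_get_possible_config_file_names_for_host at hpre
      rw [hs] at hpre
      simp only [Option.getD_some] at hpre
      have h2 : ¬ parts.length < 2 := by omega
      simp only [h2, if_false]
      exact pv_spec_aux parts file_extension (by omega)
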